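-- pv_equiv track=rewrite | github.com/H0r4c3/Challenges | py.checkio.org/letter_queue.py | letter_queue_
-- ===== SOURCE A (Python) =====
-- from typing import List
--
-- def letter_queue_(commands: List[str]) -> str:
--     queue = list()
--     for item in commands:
--         if "PUSH" in item:
--             queue.append(item[-1])
--         if ("POP" in item) and len(queue):
--             del queue[0]
--
--     return "".join(queue)
-- ===== SOURCE B (Python) =====
-- from typing import List
--
-- def letter_queue_(commands: List[str]) -> str:
--     # first pass: every pushed letter, in order
--     letters = [item[-1] for item in commands if "PUSH" in item]
--     # second pass: count how many letters a successful POP removes from the front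
--     size = 0
--     drops = 0
--     for item in commands:
--         if "PUSH" in item:
--             size += 1
--         if "POP" in item and size > 0:
--             size -= 1
--             drops += 1
--     return "".join(letters[drops:])
-- ===== Notes on version B (the rewrite author's own statement) =====
-- stated objective: alternative
-- what changed: Replaces A's single pass that mutates a queue (append / delete-front) by a two-pass count-then-slice decomposition: one comprehension collects all pushed letters, a second pass counts successful pops with a size counter, and the result is the letter list with that many front elements sliced off.
import Mathlib
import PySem

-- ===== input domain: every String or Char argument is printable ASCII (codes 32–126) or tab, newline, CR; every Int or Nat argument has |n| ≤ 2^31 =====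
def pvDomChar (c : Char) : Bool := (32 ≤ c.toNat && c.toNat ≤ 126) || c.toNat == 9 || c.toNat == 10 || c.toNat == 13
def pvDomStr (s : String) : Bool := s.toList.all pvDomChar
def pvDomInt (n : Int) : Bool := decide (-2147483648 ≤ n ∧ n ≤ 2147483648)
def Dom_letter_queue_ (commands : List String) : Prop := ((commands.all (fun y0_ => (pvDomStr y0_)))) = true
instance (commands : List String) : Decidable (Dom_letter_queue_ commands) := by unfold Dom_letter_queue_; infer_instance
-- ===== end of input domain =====

-- B replaces A's queue mutation by a count-then-slice decomposition (two passes, no front deletion); objective: alternative.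

-- item[-1]; under the guard "PUSH" in item the string is nonempty, so the default is never used
def pvLast (item : String) : Char := (PySem.Str.pyGet? item (-1)).getD ' '

-- ===== PORT A =====
def pvStepA (queue : List Char) (item : String) : List Char :=
  let queue := if PySem.Str.isIn "PUSH" item then queue ++ [pvLast item] else queue
  if PySem.Str.isIn "POP" item && (queue.length != 0) then queue.drop 1 else queue

def letter_queue_ (commands : List String) : String :=
  String.ofList (commands.foldl pvStepA [])

-- ===== PORT B =====
def pvLetters (commands : List String) : List Char :=
  (commands.filter (fun item => PySem.Str.isIn "PUSH" item)).map pvLast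

def pvStepB (sd : Int × Int) (item : String) : Int × Int :=
  let sd := if PySem.Str.isIn "PUSH" item then (sd.1 + 1, sd.2) else sd
  if PySem.Str.isIn "POP" item && decide (0 < sd.1) then (sd.1 - 1, sd.2 + 1) else sd

def letter_queue__alt (commands : List String) : String :=
  let letters := pvLetters commands
  let sd := commands.foldl pvStepB (0, 0)
  String.ofList (PySem.List.slice letters (some sd.2) none)

-- ===== PRECONDITION & SPEC =====
def Spec_letter_queue_ (commands : List String) (out : String) : Prop := out = letter_queue__alt commands
instance (commands : List String) (out : String) : Decidable (Spec_letter_queue_ commands out) := by unfold Spec_letter_queue_; infer_instance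

-- ===== CLAIM (what is proved, stated in full; the proofs are below) =====
def Claim_equal_letter_queue_ : Prop := ∀ (commands : List String), Dom_letter_queue_ commands → Spec_letter_queue_ commands (letter_queue_ commands)

-- ===== LEMMAS AND PROOFS =====

-- loop-step: A's body shrinks/extends the queue exactly as B's counter body predicts
theorem pv_step (queue : List Char) (d0 : Int) (item : String) :
    ∃ (q2 : List Char) (δ : Int),
      pvStepA queue item = q2
      ∧ pvStepB ((queue.length : Int), d0) item = ((q2.length : Int), d0 + δ)
      ∧ 0 ≤ δ
      ∧ ∀ L : List Char,
          q2 ++ L = (((if PySem.Str.isIn "PUSH" item then queue ++ [pvLast item] else queue) : List Char) ++ L).drop δ.toNat := by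
  cases hP : PySem.Str.isIn "PUSH" item with
  | false =>
    cases hO : PySem.Str.isIn "POP" item with
    | false =>
      refine ⟨queue, 0, ?_, ?_, le_refl 0, ?_⟩
      · simp only [pvStepA, hP, hO]; simp
      · simp only [pvStepB, hP, hO]; simp
      · intro L; simp
    | true =>
      cases queue with
      | nil =>
        refine ⟨[], 0, ?_, ?_, le_refl 0, ?_⟩
        · simp only [pvStepA, hP, hO]; simp
        · simp only [pvStepB, hP, hO]; simp
        · intro L; simp
      | cons x t =>
        refine ⟨t, 1, ?_, ?_, by omega, ?_⟩
        · simp only [pvStepA, hP, hO]; simp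
        · simp only [pvStepB, hP, hO]; simp
        · intro L; simp
  | true =>
    cases hO : PySem.Str.isIn "POP" item with
    | false =>
      refine ⟨queue ++ [pvLast item], 0, ?_, ?_, le_refl 0, ?_⟩
      · simp only [pvStepA, hP, hO]; simp
      · simp only [pvStepB, hP, hO]; simp
      · intro L; simp
    | true =>
      refine ⟨(queue ++ [pvLast item]).drop 1, 1, ?_, ?_, by omega, ?_⟩
      · simp only [pvStepA, hP, hO]; simp
      · simp only [pvStepB, hP, hO]
        rw [if_pos (by simp)]
        simp
      · intro L; cases queue <;> simp

-- loop invariant: running A's queue loop from `queue` equals dropping, from `queue ++ pushed letters`,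
-- the number of successful pops B's counter loop adds; B's first component tracks the queue length.
theorem pv_main (cmds : List String) : ∀ (queue : List Char) (d0 : Int),
    cmds.foldl pvStepA queue
      = (queue ++ pvLetters cmds).drop ((cmds.foldl pvStepB ((queue.length : Int), d0)).2 - d0).toNat
    ∧ (cmds.foldl pvStepB ((queue.length : Int), d0)).1
        = ((cmds.foldl pvStepA queue).length : Int)
    ∧ d0 ≤ (cmds.foldl pvStepB ((queue.length : Int), d0)).2 := by
  induction cmds with
  | nil => intro queue d0; simp [pvLetters]
  | cons item rest ih =>
    intro queue d0
    have hL : pvLetters (item :: rest)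
        = (if PySem.Str.isIn "PUSH" item then [pvLast item] else []) ++ pvLetters rest := by
      cases hP : PySem.Str.isIn "PUSH" item <;>
        simp only [pvLetters, List.filter_cons, hP, if_true, if_false, Bool.false_eq_true,
          List.map_cons, List.nil_append, List.singleton_append]
    obtain ⟨q2, d, hA, hB, hd, hfact⟩ := pv_step queue d0 item
    obtain ⟨ih1, ih2, ih3⟩ := ih q2 (d0 + d)
    rw [List.foldl_cons, List.foldl_cons, hA, hB]
    refine ⟨?_, ih2, by omega⟩
    rw [ih1]
    have hsplit : queue ++ pvLetters (item :: rest)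
        = (if PySem.Str.isIn "PUSH" item then queue ++ [pvLast item] else queue) ++ pvLetters rest := by
      rw [hL]
      cases hP : PySem.Str.isIn "PUSH" item <;>
        simp only [Bool.false_eq_true, if_false, if_true, List.nil_append, List.append_assoc]
    rw [hsplit, hfact (pvLetters rest), List.drop_drop]
    congr 1
    omega

-- ===== VERDICT (by name: the statement is the Claim_ definition above) =====
theorem letter_queue__spec : Claim_equal_letter_queue_ := by
  intro commands _
  unfold Spec_letter_queue_ letter_queue_ letter_queue__alt
  obtain ⟨h1, _, h3⟩ := pv_main commands [] 0
  simp only [List.length_nil, Nat.cast_zero] at h1 h3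
  dsimp only
  rw [PySem.List.slice_from _ h3, h1]
  simp
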